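-- pv_equiv track=rewrite | github.com/ModPunchtree/URCLBot | genericURCLOptimiser/genericURCLOptimiser.py | SETBRZ
-- ===== SOURCE A (Python) =====
-- def SETBRZ(code: list) -> list:
--     for i, j in enumerate(code):
--         if i == len(code) - 1:
--             break
--         if j.startswith("SET") and code[i + 1].startswith("BRZ") and code[i + 1][code[i + 1].find(",") + 2: ] == j[j.find(" ") + 1: j.find(",")]:
--             if j[3: 5] == "GE":
--                 code[i + 1] = "BRL " + code[i + 1][4: code[i + 1].index(",")] + j[j.index(","): ]
--                 code.pop(i)
--                 return SETBRZ(code)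
--             elif j[3: 5] == "LE":
--                 code[i + 1] = "BRG " + code[i + 1][4: code[i + 1].index(",")] + j[j.index(","): ]
--                 code.pop(i)
--                 return SETBRZ(code)
--             elif j[3] == "G":
--                 code[i + 1] = "BLE " + code[i + 1][4: code[i + 1].index(",")] + j[j.index(","): ]
--                 code.pop(i)
--                 return SETBRZ(code)
--             elif j[3] == "L":
--                 code[i + 1] = "BGE " + code[i + 1][4: code[i + 1].index(",")] + j[j.index(","): ]
--                 code.pop(i)
--                 return SETBRZ(code)
--     return code
-- ===== SOURCE B (Python) =====
-- # B: single forward pass. A transformed branch line starts with "BR"/"BL"/"BG", never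
-- # "SET"/"BRZ", so a fusion can never create a new fusible pair: no restart is needed.
-- # Note: A mutates its argument in place; B is pure (equivalence is about the return value).
--
-- _OP2 = {"GE": "BRL", "LE": "BRG"}
-- _OP1 = {"G": "BLE", "L": "BGE"}
--
-- def SETBRZ(code: list) -> list:
--     out = []
--     i = 0
--     n = len(code)
--     while i < n - 1:
--         j, k = code[i], code[i + 1]
--         if (j.startswith("SET") and k.startswith("BRZ")
--                 and k[k.find(",") + 2:] == j[j.find(" ") + 1: j.find(",")]):
--             op = _OP2.get(j[3:5]) or _OP1.get(j[3:4])
--             if op is not None: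
--                 out.append(op + " " + k[4: k.index(",")] + j[j.index(","):])
--                 i += 2
--                 continue
--         out.append(j)
--         i += 1
--     if i == n - 1:
--         out.append(code[i])
--     return out
-- ===== Notes on version B (the rewrite author's own statement) =====
-- stated objective: alternative
-- what changed: A restarts the whole scan from index 0 (via recursion on the mutated list) after every fusion; B does one forward pass with a dict lookup for the opcode, justified because a fused branch line never starts with SET or BRZ and so can never create a new match.
import Mathlib
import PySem

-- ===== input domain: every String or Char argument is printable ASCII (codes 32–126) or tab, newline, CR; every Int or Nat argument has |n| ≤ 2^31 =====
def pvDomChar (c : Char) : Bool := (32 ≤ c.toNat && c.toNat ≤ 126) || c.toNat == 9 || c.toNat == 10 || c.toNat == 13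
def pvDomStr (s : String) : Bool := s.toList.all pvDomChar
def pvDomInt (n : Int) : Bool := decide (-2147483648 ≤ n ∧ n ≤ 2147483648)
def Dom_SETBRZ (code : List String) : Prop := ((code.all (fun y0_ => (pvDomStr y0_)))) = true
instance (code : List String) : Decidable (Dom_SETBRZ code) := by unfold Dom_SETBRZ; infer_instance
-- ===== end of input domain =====

-- B replaces A's restart-from-scratch recursion by a single forward pass (a fused branch can
-- never start a new SET/BRZ pair, so no rescan is needed).  A mutates its argument in place,
-- B is pure: the equivalence proved here is about the return value only.

-- ===== PORT A =====
-- the big match condition of A's loop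
def condA (j k : List Char) : Bool :=
  PySem.Chars.startswith j ['S', 'E', 'T'] &&
  PySem.Chars.startswith k ['B', 'R', 'Z'] &&
  (PySem.Chars.slice k (some (PySem.Chars.find k [','] + 2)) none
    == PySem.Chars.slice j (some (PySem.Chars.find j [' '] + 1)) (some (PySem.Chars.find j [','])))

-- op + code[i+1][4: code[i+1].index(",")] + j[j.index(","):]; .index(",") ported as find —
-- equal whenever ',' occurs (guaranteed by Pre_); Python raises ValueError otherwise.
def newA (op j k : List Char) : List Char :=
  op ++ PySem.Chars.slice k (some 4) (some (PySem.Chars.find k [','])) ++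
    PySem.Chars.slice j (some (PySem.Chars.find j [','])) none

def fireA (j k : List Char) : Option (List Char) :=
  if condA j k then
    if PySem.Chars.slice j (some 3) (some 5) == ['G', 'E'] then some (newA ['B', 'R', 'L', ' '] j k)
    else if PySem.Chars.slice j (some 3) (some 5) == ['L', 'E'] then some (newA ['B', 'R', 'G', ' '] j k)
    else
      match PySem.Chars.pyGet? j 3 with
      | some c =>
        if c == 'G' then some (newA ['B', 'L', 'E', ' '] j k)
        else if c == 'L' then some (newA ['B', 'G', 'E', ' '] j k)
        else none
      | none => none  -- j[3] raises IndexError in Python; such inputs are outside Pre_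
  else none

-- A's for-loop with its break at i == len(code)-1: find the first pair that transforms
def scanA : List String → Nat → Option (Nat × List Char)
  | j :: k :: rest, i =>
    match fireA j.toList k.toList with
    | some nl => some (i, nl)
    | none => scanA (k :: rest) (i + 1)
  | _, _ => none

-- termination helper for SETBRZ's recursion (cited by decreasing_by)
theorem scanA_bound : ∀ (l : List String) (i0 i : Nat) (nl : List Char),
    scanA l i0 = some (i, nl) → i0 ≤ i ∧ i - i0 + 2 ≤ l.length := by
  intro l
  induction l with
  | nil => intro i0 i nl h; simp [scanA] at h
  | cons j t ih =>
    cases t with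
    | nil => intro i0 i nl h; simp [scanA] at h
    | cons k rest =>
      intro i0 i nl h
      simp only [scanA] at h
      cases hf : fireA j.toList k.toList with
      | some nl' =>
        rw [hf] at h
        simp only [Option.some.injEq, Prod.mk.injEq] at h
        simp [← h.1]
      | none =>
        rw [hf] at h
        have := ih (i0 + 1) i nl h
        simp only [List.length_cons] at this ⊢
        omega

-- "code[i+1] = <fused>; code.pop(i); return SETBRZ(code)"
def SETBRZ (code : List String) : List String :=
  match h : scanA code 0 with
  | some (i, nl) => SETBRZ (code.take i ++ String.ofList nl :: code.drop (i + 2))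
  | none => code
termination_by code.length
decreasing_by
  have hb := scanA_bound code 0 i nl h
  simp only [List.length_append, List.length_take, List.length_cons, List.length_drop]
  omega

-- ===== PORT B =====
def tblB2 : PySem.Dict (List Char) (List Char) :=
  ⟨[(['G', 'E'], ['B', 'R', 'L']), (['L', 'E'], ['B', 'R', 'G'])]⟩
def tblB1 : PySem.Dict (List Char) (List Char) :=
  ⟨[(['G'], ['B', 'L', 'E']), (['L'], ['B', 'G', 'E'])]⟩

-- _OP2.get(j[3:5]) or _OP1.get(j[3:4])
def opB (j : List Char) : Option (List Char) :=
  (PySem.Dict.get? tblB2 (PySem.Chars.slice j (some 3) (some 5))).or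
    (PySem.Dict.get? tblB1 (PySem.Chars.slice j (some 3) (some 4)))

def condB (j k : List Char) : Bool :=
  PySem.Chars.startswith j ['S', 'E', 'T'] &&
  (PySem.Chars.startswith k ['B', 'R', 'Z'] &&
    (PySem.Chars.slice k (some (PySem.Chars.find k [','] + 2)) none
      == PySem.Chars.slice j (some (PySem.Chars.find j [' '] + 1)) (some (PySem.Chars.find j [',']))))

-- Source B's while loop: 'out' is acc (built in reverse, reversed on exit), the loop index walks
-- the remaining list; k.index(",") / j.index(",") ported as find — equal whenever ',' occurs (Pre_).
def goB : List String → List String → List String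
  | acc, [] => acc.reverse
  | acc, [j] => (j :: acc).reverse
  | acc, j :: k :: rest =>
    if condB j.toList k.toList then
      match opB j.toList with
      | some op =>
        goB (String.ofList (op ++ ' ' ::
          (PySem.Chars.slice k.toList (some 4) (some (PySem.Chars.find k.toList [','])) ++
           PySem.Chars.slice j.toList (some (PySem.Chars.find j.toList [','])) none)) :: acc) rest
      | none => goB (j :: acc) (k :: rest)
    else goB (j :: acc) (k :: rest)

def SETBRZ_alt (code : List String) : List String := goB [] code

-- ===== PRECONDITION & SPEC =====
-- a SET line that would fuse (one of the four comparison kinds)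
def pvFiresP (j : List Char) : Bool :=
  PySem.Chars.slice j (some 3) (some 5) == ['G', 'E'] ||
  PySem.Chars.slice j (some 3) (some 5) == ['L', 'E'] ||
  PySem.Chars.slice j (some 3) (some 4) == ['G'] ||
  PySem.Chars.slice j (some 3) (some 4) == ['L']

-- an adjacent pair on which A raises: the pair matches and either the SET line is bare "SET"
-- (j[3] → IndexError) or it fuses with a comma missing (.index(",") → ValueError)
def pvBadP (j k : List Char) : Bool :=
  condA j k && (decide (j.length < 4) || (pvFiresP j && (!(j.contains ',') || !(k.contains ','))))

-- Pre_ excludes exactly the inputs on which the Python A raises (IndexError/ValueError above);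
-- A returns normally on every input admitted here.
def Pre_SETBRZ (code : List String) : Prop :=
  ∀ p ∈ code.zip code.tail, pvBadP p.1.toList p.2.toList = false

instance (code : List String) : Decidable (Pre_SETBRZ code) := by unfold Pre_SETBRZ; infer_instance

def pvWitness_SETBRZ : List String := ["SETG R1,R2", "BRZ .loop, R1", "MOV R1,R2"]

def Spec_SETBRZ (code : List String) (out : List String) : Prop := out = SETBRZ_alt code
instance (code : List String) (out : List String) : Decidable (Spec_SETBRZ code out) := by unfold Spec_SETBRZ; infer_instance

-- ===== CLAIM (what is proved, stated in full; the proofs are below) =====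
def Claim_equal_SETBRZ : Prop := ∀ (code : List String), Dom_SETBRZ code → Pre_SETBRZ code → Spec_SETBRZ code (SETBRZ code)

-- ===== LEMMAS AND PROOFS =====

-- the value B computes for an adjacent pair, as an Option (proved equal to fireA below)
def fireB (j k : List Char) : Option (List Char) :=
  if condB j k then
    match opB j with
    | some op =>
      some (op ++ ' ' ::
        (PySem.Chars.slice k (some 4) (some (PySem.Chars.find k [','])) ++
         PySem.Chars.slice j (some (PySem.Chars.find j [','])) none))
    | none => none
  else none

theorem goB_cons₂ (acc : List String) (j k : String) (rest : List String) :
    goB acc (j :: k :: rest) =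
      match fireB j.toList k.toList with
      | some nl => goB (String.ofList nl :: acc) rest
      | none => goB (j :: acc) (k :: rest) := by
  simp only [goB, fireB]
  by_cases hc : condB j.toList k.toList
  · simp only [hc, if_true]
    cases opB j.toList <;> rfl
  · simp [hc]

theorem condB_eq_condA (j k : List Char) : condB j k = condA j k := by
  simp [condA, condB, Bool.and_assoc]

theorem slice_3_4 (l : List Char) :
    PySem.Chars.slice l (some 3) (some 4) =
      (match l[3]? with | some c => [c] | none => []) := by
  simp only [PySem.Chars.slice_eq_listSlice]
  rw [PySem.List.slice_toNat _ (by norm_num) (by norm_num)]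
  rw [← List.head?_drop]
  cases hd : l.drop 3 <;> simp [hd]

theorem fireB_eq_fireA (j k : List Char) : fireB j k = fireA j k := by
  unfold fireB fireA
  rw [condB_eq_condA]
  by_cases hc : condA j k
  · simp only [hc, if_true]
    unfold opB newA
    simp only [PySem.Chars.slice_eq_listSlice, beq_iff_eq]
    by_cases h1 : PySem.List.slice j (some 3) (some 5) = ['G', 'E']
    · simp [PySem.Dict.get?, tblB2, h1]
    · by_cases h2 : PySem.List.slice j (some 3) (some 5) = ['L', 'E']
      · simp [PySem.Dict.get?, tblB2, h2]
      · have hget2 : PySem.Dict.get? tblB2 (PySem.List.slice j (some 3) (some 5)) = none := by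
          simp [PySem.Dict.get?, tblB2]
          exact ⟨fun hq => h1 hq.symm, fun hq => h2 hq.symm⟩
        simp only [hget2, Option.none_or, h1, h2, if_false]
        have h34 := slice_3_4 j
        simp only [PySem.Chars.slice_eq_listSlice] at h34
        rw [h34]
        rw [PySem.Chars.pyGet?_eq_listPyGet?, PySem.List.pyGet?_ofNat' j 3]
        cases h3 : j[3]? with
        | none => simp [PySem.Dict.get?, tblB1]
        | some c =>
          by_cases hG : c = 'G'
          · subst hG; simp [PySem.Dict.get?, tblB1]
          · by_cases hL : c = 'L'
            · subst hL; simp [PySem.Dict.get?, tblB1]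
            · simp [PySem.Dict.get?, tblB1, hG, hL, Ne.symm hG, Ne.symm hL]
  · simp [hc]

-- the pure single pass behind goB (goB acc l = acc.reverse ++ gB l)
def gB : List String → List String
  | [] => []
  | [j] => [j]
  | j :: k :: rest =>
    match fireA j.toList k.toList with
    | some nl => String.ofList nl :: gB rest
    | none => j :: gB (k :: rest)

theorem gB_fire (j k : String) (rest : List String) (nl : List Char)
    (hf : fireA j.toList k.toList = some nl) :
    gB (j :: k :: rest) = String.ofList nl :: gB rest := by
  simp [gB, hf]

theorem gB_nofire (j k : String) (rest : List String)
    (hf : fireA j.toList k.toList = none) :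
    gB (j :: k :: rest) = j :: gB (k :: rest) := by
  simp [gB, hf]

theorem goB_eq_gB : ∀ (l acc : List String), goB acc l = acc.reverse ++ gB l := by
  intro l
  induction l using gB.induct with
  | case1 => intro acc; simp [goB, gB]
  | case2 j => intro acc; simp [goB, gB]
  | case3 j k rest nl hf ih =>
    intro acc
    rw [goB_cons₂, fireB_eq_fireA, hf, gB_fire j k rest nl hf]
    simp [ih]
  | case4 j k rest hf ih =>
    intro acc
    rw [goB_cons₂, fireB_eq_fireA, hf, gB_nofire j k rest hf]
    simp [ih]

-- a fused line starts with "BRL "/"BRG "/"BLE "/"BGE ": it can never be the SET or the BRZ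
-- side of a later match
theorem fireA_shape (j k nl : List Char) (h : fireA j k = some nl) :
    PySem.Chars.startswith nl ['S', 'E', 'T'] = false ∧
    PySem.Chars.startswith nl ['B', 'R', 'Z'] = false := by
  unfold fireA newA at h
  split at h
  · split at h
    · obtain rfl : _ = nl := Option.some.inj h
      constructor <;> (rw [Bool.eq_false_iff, Ne, PySem.Chars.startswith_iff]; simp)
    · split at h
      · obtain rfl : _ = nl := Option.some.inj h
        constructor <;> (rw [Bool.eq_false_iff, Ne, PySem.Chars.startswith_iff]; simp)
      · split at h
        · split at h
          · obtain rfl : _ = nl := Option.some.inj h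
            constructor <;> (rw [Bool.eq_false_iff, Ne, PySem.Chars.startswith_iff]; simp)
          · split at h
            · obtain rfl : _ = nl := Option.some.inj h
              constructor <;> (rw [Bool.eq_false_iff, Ne, PySem.Chars.startswith_iff]; simp)
            · exact absurd h (by simp)
        · exact absurd h (by simp)
  · exact absurd h (by simp)

theorem fireA_none_left (nl : List Char) (y : String)
    (h : PySem.Chars.startswith nl ['S', 'E', 'T'] = false) : fireA nl y.toList = none := by
  unfold fireA condA
  simp [h]

theorem fireA_none_right (x : String) (nl : List Char)
    (h : PySem.Chars.startswith nl ['B', 'R', 'Z'] = false) : fireA x.toList nl = none := by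
  unfold fireA condA
  simp [h]

theorem gB_cons_none (j : String) (l : List String)
    (h : ∀ t ∈ l.head?, fireA j.toList t.toList = none) : gB (j :: l) = j :: gB l := by
  cases l with
  | nil => simp [gB]
  | cons t ts =>
    have ht := h t (by simp)
    simp [gB, ht]

theorem gB_of_scanA_none : ∀ (l : List String) (i0 : Nat), scanA l i0 = none → gB l = l := by
  intro l
  induction l with
  | nil => intro _ _; simp [gB]
  | cons j t ih =>
    cases t with
    | nil => intro _ _; simp [gB]
    | cons k rest =>
      intro i0 h
      simp only [scanA] at h
      cases hf : fireA j.toList k.toList with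
      | some nl' => rw [hf] at h; exact absurd h (by simp)
      | none =>
        rw [hf] at h
        rw [gB_nofire j k rest hf]
        rw [ih (i0 + 1) h]

-- the result line of the first transform, as scanA hands it up
theorem scanA_shape : ∀ (l : List String) (i0 i : Nat) (nl : List Char),
    scanA l i0 = some (i, nl) →
    PySem.Chars.startswith nl ['S', 'E', 'T'] = false ∧
    PySem.Chars.startswith nl ['B', 'R', 'Z'] = false := by
  intro l
  induction l with
  | nil => intro i0 i nl h; simp [scanA] at h
  | cons j t ih =>
    cases t with
    | nil => intro i0 i nl h; simp [scanA] at h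
    | cons k rest =>
      intro i0 i nl h
      simp only [scanA] at h
      cases hf : fireA j.toList k.toList with
      | some nl' =>
        rw [hf] at h
        obtain ⟨-, rfl⟩ : i0 = i ∧ nl' = nl := by simpa using h
        exact fireA_shape _ _ _ hf
      | none =>
        rw [hf] at h
        exact ih (i0 + 1) i nl h

-- A's one rewrite step does not change the single-pass result
theorem gB_step : ∀ (l : List String) (i0 i : Nat) (nl : List Char),
    scanA l i0 = some (i, nl) →
    gB l = gB (l.take (i - i0) ++ String.ofList nl :: l.drop (i - i0 + 2)) := by
  intro l
  induction l with
  | nil => intro i0 i nl h; simp [scanA] at h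
  | cons j t ih =>
    cases t with
    | nil => intro i0 i nl h; simp [scanA] at h
    | cons k rest =>
      intro i0 i nl h
      have hshape := scanA_shape _ _ _ _ h
      simp only [scanA] at h
      cases hf : fireA j.toList k.toList with
      | some nl' =>
        rw [hf] at h
        obtain ⟨hi, rfl⟩ : i0 = i ∧ nl' = nl := by simpa using h
        have hz : i - i0 = 0 := by omega
        rw [hz]
        simp only [List.take_zero, List.nil_append, Nat.zero_add, List.drop_succ_cons,
          List.drop_zero]
        rw [gB_fire j k rest nl' hf]
        have hcn := gB_cons_none (String.ofList nl') rest (by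
          intro t ht
          apply fireA_none_left
          rw [String.toList_ofList]; exact hshape.1)
        rw [hcn]
      | none =>
        rw [hf] at h
        have hb := scanA_bound _ _ _ _ h
        have ihs := ih (i0 + 1) i nl h
        have h1 : i - i0 = (i - (i0 + 1)) + 1 := by omega
        rw [h1]
        simp only [List.take_succ_cons, List.drop_succ_cons, List.cons_append]
        rw [gB_nofire j k rest hf, ihs]
        simp only [List.drop_succ_cons]
        have hcn := gB_cons_none j
          ((k :: rest).take (i - (i0 + 1)) ++
            String.ofList nl :: List.drop (i - (i0 + 1) + 1) rest) (by
          intro t ht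
          cases hm : i - (i0 + 1) with
          | zero =>
            rw [hm] at ht
            simp only [List.take_zero, List.nil_append, List.head?_cons,
              Option.mem_def, Option.some.injEq] at ht
            subst ht
            apply fireA_none_right
            rw [String.toList_ofList]; exact hshape.2
          | succ m =>
            rw [hm] at ht
            simp only [List.take_succ_cons, List.cons_append, List.head?_cons,
              Option.mem_def, Option.some.injEq] at ht
            subst ht
            exact hf)
        rw [hcn]

theorem SETBRZ_eq_gB (code : List String) : SETBRZ code = gB code := by
  have main : ∀ (n : Nat) (code : List String), code.length ≤ n → SETBRZ code = gB code := by
    intro n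
    induction n with
    | zero =>
      intro code hlen
      have : code = [] := List.eq_nil_of_length_eq_zero (Nat.le_zero.mp hlen)
      subst this
      rw [SETBRZ]
      simp [scanA, gB]
    | succ n ihn =>
      intro code hlen
      rw [SETBRZ]
      split
      · rename_i i nl h
        have hb := scanA_bound code 0 i nl h
        have hlt : (code.take i ++ String.ofList nl :: code.drop (i + 2)).length ≤ n := by
          simp only [List.length_append, List.length_take, List.length_cons, List.length_drop]
          omega
        rw [ihn _ hlt]
        have := gB_step code 0 i nl h
        simp only [Nat.sub_zero] at this
        exact this.symm
      · rename_i h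
        exact (gB_of_scanA_none code 0 h).symm
  exact main code.length code le_rfl

-- ===== VERDICT (by name: the statement is the Claim_ definition above) =====
theorem SETBRZ_spec : Claim_equal_SETBRZ := by
  intro code _ _
  unfold Spec_SETBRZ SETBRZ_alt
  rw [SETBRZ_eq_gB, goB_eq_gB]
  simp
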